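-- pv_equiv track=rewrite | github.com/Lazycoder744/CyberNoodles | cybernoodles/data/dataset_builder.py | _clear_manifest_warning
-- ===== SOURCE A (Python) =====
-- def _clear_manifest_warning(manifest, code):
--     current = [
--         item for item in manifest.get("warnings", [])
--         if isinstance(item, dict)
--     ]
--     updated = [item for item in current if item.get("code") != code]
--     if current == updated:
--         return False
--     manifest["warnings"] = updated
--     return True
-- ===== SOURCE B (Python) =====
-- def _clear_manifest_warning(manifest, code):
--     def prune(items):
--         # Recursively process the tail first, building the pruned list back-to-front.
--         # Returns (found, pruned): found = a matching dict was seen, pruned = the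
--         # remaining dict items with the matching code removed.
--         if not items:
--             return False, []
--         found, rest = prune(items[1:])
--         head = items[0]
--         if not isinstance(head, dict):
--             return found, rest
--         if head.get("code") == code:
--             return True, rest
--         return found, [head] + rest
--
--     found, pruned = prune(manifest.get("warnings", []))
--     if not found:
--         return False
--     manifest["warnings"] = pruned
--     return True
-- ===== Notes on version B (the rewrite author's own statement) =====
-- stated objective: alternative
-- what changed: Replaced the two forward list comprehensions plus list-equality comparison with a structural recursion over the warnings list that builds the pruned list back-to-front while propagating a found flag in a returned pair, mutating the manifest only when the flag is set.
import Mathlib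
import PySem

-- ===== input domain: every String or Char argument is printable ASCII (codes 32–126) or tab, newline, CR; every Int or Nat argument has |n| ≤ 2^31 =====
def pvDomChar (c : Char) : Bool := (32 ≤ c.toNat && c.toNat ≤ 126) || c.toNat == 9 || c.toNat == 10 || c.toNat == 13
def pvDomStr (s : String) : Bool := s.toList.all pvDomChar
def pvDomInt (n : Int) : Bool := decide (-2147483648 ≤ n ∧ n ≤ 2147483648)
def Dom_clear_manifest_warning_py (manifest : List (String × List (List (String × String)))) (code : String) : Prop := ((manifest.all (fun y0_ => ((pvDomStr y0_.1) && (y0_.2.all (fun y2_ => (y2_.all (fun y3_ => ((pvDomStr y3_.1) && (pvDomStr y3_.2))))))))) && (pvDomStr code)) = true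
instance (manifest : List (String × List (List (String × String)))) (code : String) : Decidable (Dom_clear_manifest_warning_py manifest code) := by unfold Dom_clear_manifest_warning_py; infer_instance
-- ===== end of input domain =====

-- B replaces A's two comprehensions plus list-equality test with a structural recursion
-- that builds the pruned list back-to-front and propagates a found flag (objective: alternative).
-- A mutates manifest["warnings"] in place when it returns True; B performs the same mutation;
-- the equivalence proved here is about the RETURN value only.

-- ===== PORT A =====
def clear_manifest_warning_py (manifest : List (String × List (List (String × String)))) (code : String) : Bool :=
  -- isinstance(item, dict) holds for every item under the type convention, so the first comprehension is the identity
  let current := (PySem.Dict.mk manifest).getD "warnings" []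
  let updated := current.filter (fun item => !((PySem.Dict.mk item).get? "code" == some code))
  if current == updated then false else true

-- ===== PORT B =====
-- Source B's recursive helper prune: tail first, returns (found, pruned); the non-dict branch
-- vanishes under the type convention (every item is a dict).
def pvPrune (code : String) : List (List (String × String)) → Bool × List (List (String × String))
  | [] => (false, [])
  | head :: rest =>
      let r := pvPrune code rest
      if (PySem.Dict.mk head).get? "code" == some code then (true, r.2)
      else (r.1, [head] ++ r.2)

def clear_manifest_warning_py_alt (manifest : List (String × List (List (String × String)))) (code : String) : Bool :=
  let r := pvPrune code ((PySem.Dict.mk manifest).getD "warnings" [])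
  if !r.1 then false else true

-- ===== PRECONDITION & SPEC =====
def Spec_clear_manifest_warning_py (manifest : List (String × List (List (String × String)))) (code : String) (out : Bool) : Prop := out = clear_manifest_warning_py_alt manifest code
instance (manifest : List (String × List (List (String × String)))) (code : String) (out : Bool) : Decidable (Spec_clear_manifest_warning_py manifest code out) := by unfold Spec_clear_manifest_warning_py; infer_instance

-- ===== CLAIM (what is proved, stated in full; the proofs are below) =====
def Claim_equal_clear_manifest_warning_py : Prop := ∀ (manifest : List (String × List (List (String × String)))) (code : String), Dom_clear_manifest_warning_py manifest code → Spec_clear_manifest_warning_py manifest code (clear_manifest_warning_py manifest code)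

-- ===== LEMMAS AND PROOFS =====
theorem pvPrune_fst (code : String) (l : List (List (String × String))) :
    (pvPrune code l).1 = l.any (fun item => (PySem.Dict.mk item).get? "code" == some code) := by
  induction l with
  | nil => simp [pvPrune]
  | cons item rest ih =>
      by_cases h : ((PySem.Dict.mk item).get? "code" == some code) = true
      · simp [pvPrune, h]
      · simp only [Bool.not_eq_true] at h
        simp [pvPrune, h, ih]

-- ===== VERDICT (by name: the statement is the Claim_ definition above) =====
theorem clear_manifest_warning_py_spec : Claim_equal_clear_manifest_warning_py := by
  intro manifest code _
  unfold Spec_clear_manifest_warning_py clear_manifest_warning_py clear_manifest_warning_py_alt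
  simp only [pvPrune_fst]
  set l := (PySem.Dict.mk manifest).getD "warnings" [] with hl
  by_cases h : ∀ item ∈ l, ((PySem.Dict.mk item).get? "code" == some code) = false
  · have hfilter : l.filter (fun item => !((PySem.Dict.mk item).get? "code" == some code)) = l := by
      apply List.filter_eq_self.mpr
      intro a ha; simp [h a ha]
    have hany : l.any (fun item => (PySem.Dict.mk item).get? "code" == some code) = false := by
      simp only [List.any_eq_false]
      intro a ha; simp [h a ha]
    simp [hfilter, hany]
  · push_neg at h
    obtain ⟨a, ha, hq⟩ := h
    simp only [Bool.not_eq_false] at hq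
    have hany : l.any (fun item => (PySem.Dict.mk item).get? "code" == some code) = true :=
      List.any_eq_true.mpr ⟨a, ha, hq⟩
    have hne : ¬ (l == l.filter (fun item => !((PySem.Dict.mk item).get? "code" == some code))) = true := by
      intro hbeq
      have heq : l = l.filter (fun item => !((PySem.Dict.mk item).get? "code" == some code)) :=
        eq_of_beq hbeq
      have := List.filter_eq_self.mp heq.symm a ha
      simp [hq] at this
    simp [hne, hany]
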